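-- pv_equiv track=rewrite | github.com/ess-dg/dg_MultiBlade_MBUTY | MBUTYcap/lib/libConfigGenerator.py | _generateCassette2ElectronicsConfig
-- ===== SOURCE A (Python) =====
-- def _generateCassette2ElectronicsConfig(num_cassettes):
--     cassette_config = []
--     ring = 0
--     hybrid = 0
--     for i in range(num_cassettes):
--         cassette_config.append({
--             "ID": i,
--             "Ring": ring,
--             "Fen": 0,
--             "Hybrid": hybrid
--         })
--         hybrid += 1
--         if hybrid >= 5:
--             hybrid = 0
--             ring += 1
--     return cassette_config
-- ===== SOURCE B (Python) =====
-- def _generateCassette2ElectronicsConfig(num_cassettes):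
--     # Overshoot-and-trim: build whole rings of 5 hybrids each, then slice to length.
--     full = [{"ID": ring * 5 + hybrid, "Ring": ring, "Fen": 0, "Hybrid": hybrid}
--             for ring in range((num_cassettes + 4) // 5)
--             for hybrid in range(5)]
--     return full[:num_cassettes]
-- ===== Notes on version B (the rewrite author's own statement) =====
-- stated objective: alternative
-- what changed: Instead of one pass threading ring/hybrid counters with a reset branch, B builds complete rings of 5 hybrids each with a nested (ring, hybrid) comprehension, overshooting to a whole number of rings, and then trims the list with a slice to the requested count.
import Mathlib
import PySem

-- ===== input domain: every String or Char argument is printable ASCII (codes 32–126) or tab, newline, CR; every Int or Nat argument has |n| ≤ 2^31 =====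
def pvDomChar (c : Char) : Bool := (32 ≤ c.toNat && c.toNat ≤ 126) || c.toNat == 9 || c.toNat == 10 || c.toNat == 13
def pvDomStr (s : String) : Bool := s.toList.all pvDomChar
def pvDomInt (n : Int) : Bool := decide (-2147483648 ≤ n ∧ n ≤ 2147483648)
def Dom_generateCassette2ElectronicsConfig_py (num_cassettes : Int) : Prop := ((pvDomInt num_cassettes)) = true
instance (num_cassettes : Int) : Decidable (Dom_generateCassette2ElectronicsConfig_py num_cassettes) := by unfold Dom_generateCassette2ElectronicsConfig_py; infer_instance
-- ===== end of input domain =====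

-- B replaces A's single counter-threading loop with a nested (ring, hybrid) build of whole
-- rings of 5, overshooting to a full ring and trimming with a slice (alternative; same cost).

-- ===== PORT A =====
-- loop state: (cassette_config, ring, hybrid)
def generateCassette2ElectronicsConfig_py (num_cassettes : Int) : List (List (String × Int)) :=
  let st := (PySem.List.pyRange 0 num_cassettes 1).foldl
    (fun (st : List (List (String × Int)) × Int × Int) i =>
      let cfg := st.1 ++ [[("ID", i), ("Ring", st.2.1), ("Fen", 0), ("Hybrid", st.2.2)]]
      let hybrid := st.2.2 + 1
      if hybrid ≥ 5 then (cfg, st.2.1 + 1, 0) else (cfg, st.2.1, hybrid))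
    ([], 0, 0)
  st.1

-- ===== PORT B =====
def generateCassette2ElectronicsConfig_py_alt (num_cassettes : Int) : List (List (String × Int)) :=
  let full := (PySem.List.pyRange 0 (PySem.Int.floordiv (num_cassettes + 4) 5) 1).flatMap
    (fun ring => (PySem.List.pyRange 0 5 1).map
      (fun hybrid => [("ID", ring * 5 + hybrid), ("Ring", ring), ("Fen", 0), ("Hybrid", hybrid)]))
  PySem.List.slice full none (some num_cassettes)

-- ===== PRECONDITION & SPEC =====
def Spec_generateCassette2ElectronicsConfig_py (num_cassettes : Int) (out : List (List (String × Int))) : Prop := out = generateCassette2ElectronicsConfig_py_alt num_cassettes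
instance (num_cassettes : Int) (out : List (List (String × Int))) : Decidable (Spec_generateCassette2ElectronicsConfig_py num_cassettes out) := by unfold Spec_generateCassette2ElectronicsConfig_py; infer_instance

-- ===== CLAIM (what is proved, stated in full; the proofs are below) =====
def Claim_equal_generateCassette2ElectronicsConfig_py : Prop := ∀ (num_cassettes : Int), Dom_generateCassette2ElectronicsConfig_py num_cassettes → Spec_generateCassette2ElectronicsConfig_py num_cassettes (generateCassette2ElectronicsConfig_py num_cassettes)

-- ===== LEMMAS AND PROOFS =====

-- the row both sides produce for index i
def pvRow (i : Int) : List (String × Int) :=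
  [("ID", i), ("Ring", PySem.Int.floordiv i 5), ("Fen", 0), ("Hybrid", PySem.Int.mod i 5)]

-- A's loop invariant: after processing 0..m-1 the accumulator is the closed-form row list
-- and the counters are m//5 and m%5.
lemma pv_invariant (m : Nat) :
    (PySem.List.pyRange 0 (m : Int) 1).foldl
      (fun (st : List (List (String × Int)) × Int × Int) i =>
        let cfg := st.1 ++ [[("ID", i), ("Ring", st.2.1), ("Fen", 0), ("Hybrid", st.2.2)]]
        let hybrid := st.2.2 + 1
        if hybrid ≥ 5 then (cfg, st.2.1 + 1, 0) else (cfg, st.2.1, hybrid))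
      ([], 0, 0)
    = ((PySem.List.pyRange 0 (m : Int) 1).map pvRow, (m : Int) / 5, (m : Int) % 5) := by
  induction m with
  | zero => simp [PySem.List.pyRange_one_eq_nil]
  | succ k ih =>
      have hsplit : PySem.List.pyRange 0 ((k + 1 : Nat) : Int) 1
          = PySem.List.pyRange 0 (k : Int) 1 ++ [(k : Int)] := by
        push_cast
        exact PySem.List.pyRange_one_succ_right (by positivity)
      rw [hsplit, List.foldl_append, List.map_append, ih]
      have h5 : (0:Int) < 5 := by norm_num
      by_cases hc : ((k : Int) % 5 + 1 ≥ 5)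
      · simp only [List.foldl_cons, List.foldl_nil, if_pos hc, List.map_cons, List.map_nil]
        refine Prod.ext ?_ (Prod.ext ?_ ?_) <;> simp [pvRow] <;> omega
      · simp only [List.foldl_cons, List.foldl_nil, if_neg hc, List.map_cons, List.map_nil]
        refine Prod.ext ?_ (Prod.ext ?_ ?_) <;> simp [pvRow] <;> omega

-- B's nested build of R full rings is the closed-form row list for the first 5*R indices.
lemma pv_blocks (R : Nat) :
    (PySem.List.pyRange 0 (R : Int) 1).flatMap
      (fun ring => (PySem.List.pyRange 0 5 1).map
        (fun hybrid => [("ID", ring * 5 + hybrid), ("Ring", ring), ("Fen", 0), ("Hybrid", hybrid)]))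
    = (PySem.List.pyRange 0 ((5 * R : Nat) : Int) 1).map pvRow := by
  induction R with
  | zero => simp [PySem.List.pyRange_one_eq_nil]
  | succ k ih =>
      have hsplit : PySem.List.pyRange 0 ((k + 1 : Nat) : Int) 1
          = PySem.List.pyRange 0 (k : Int) 1 ++ [(k : Int)] := by
        push_cast
        exact PySem.List.pyRange_one_succ_right (by positivity)
      have hsplit2 : PySem.List.pyRange 0 ((5 * (k + 1) : Nat) : Int) 1
          = PySem.List.pyRange 0 ((5 * k : Nat) : Int) 1
            ++ PySem.List.pyRange ((5 * k : Nat) : Int) ((5 * (k + 1) : Nat) : Int) 1 := by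
        exact PySem.List.pyRange_one_append _ _ _ (by positivity) (by push_cast; omega)
      rw [hsplit, List.flatMap_append, ih, hsplit2, List.map_append]
      congr 1
      rw [PySem.List.pyRange_one ((5 * k : Nat) : Int) ((5 * (k + 1) : Nat) : Int)]
      have hlen : (((5 * (k + 1) : Nat) : Int) - ((5 * k : Nat) : Int)).toNat = 5 := by
        push_cast; omega
      rw [hlen]
      have h5 : (0:Int) < 5 := by norm_num
      have hrange5 : PySem.List.pyRange 0 5 1 = [0, 1, 2, 3, 4] := by decide
      have hR5 : List.range 5 = [0, 1, 2, 3, 4] := by decide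
      simp only [List.flatMap_cons, List.flatMap_nil, List.append_nil, hrange5, hR5,
        List.map_cons, List.map_nil, pvRow,
        PySem.Int.floordiv_eq_ediv_of_pos h5, PySem.Int.mod_eq_emod_of_pos h5,
        List.cons.injEq, Prod.mk.injEq, true_and, and_true]
      push_cast
      omega

-- ===== VERDICT (by name: the statement is the Claim_ definition above) =====
theorem generateCassette2ElectronicsConfig_py_spec : Claim_equal_generateCassette2ElectronicsConfig_py := by
  intro n _
  unfold Spec_generateCassette2ElectronicsConfig_py generateCassette2ElectronicsConfig_py generateCassette2ElectronicsConfig_py_alt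
  have h5 : (0:Int) < 5 := by norm_num
  rw [PySem.Int.floordiv_eq_ediv_of_pos h5]
  by_cases h : n ≤ 0
  · have hR : (n + 4) / 5 ≤ 0 := by omega
    simp [PySem.List.pyRange_one_eq_nil h, PySem.List.pyRange_one_eq_nil hR,
      PySem.List.slice]
  · lift n to Nat using (by omega : (0:Int) ≤ n) with m
    have hRnat : ((m : Int) + 4) / 5 = (((((m : Int) + 4) / 5).toNat : Nat) : Int) := by omega
    set R : Nat := (((m : Int) + 4) / 5).toNat with hRdef
    have hge : m ≤ 5 * R := by omega
    rw [pv_invariant, hRnat, pv_blocks, PySem.List.slice_to_natCast, ← List.map_take,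
      PySem.List.pyRange_one 0 ((m : Int)), PySem.List.pyRange_one 0 (((5 * R : Nat) : Int)),
      ← List.map_take, List.take_range]
    simp only [sub_zero, Int.toNat_natCast]
    have hmin : min m (5 * R) = m := by omega
    rw [hmin]
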